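-- pv_equiv track=rewrite | github.com/nvidia-holoscan/holohub | tutorials/integrate_external_libs_into_pipeline/cuda_example.py | _determine_block_dims
-- ===== SOURCE A (Python) =====
-- def _determine_block_dims(optimal_block_size):
--     """Function to determine the 2D block size from the optimal block size."""
--     block_dim = (1, 1, 1)
--     while int(block_dim[0] * block_dim[1] * 2) <= optimal_block_size:
--         if block_dim[0] > block_dim[1]:
--             block_dim = (block_dim[0], block_dim[1] * 2, block_dim[2])
--         else:
--             block_dim = (block_dim[0] * 2, block_dim[1], block_dim[2])
--
--     return block_dim
-- ===== SOURCE B (Python) =====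
-- def _determine_block_dims(optimal_block_size):
--     """Function to determine the 2D block size from the optimal block size."""
--     n = 0
--     size = 1
--     while size * 2 <= optimal_block_size:
--         size *= 2
--         n += 1
--     return (2 ** ((n + 1) // 2), 2 ** (n // 2), 1)
-- ===== Notes on version B (the rewrite author's own statement) =====
-- stated objective: simpler
-- what changed: Replaces the alternating if/else doubling of an x-y pair by a single scalar loop that counts doublings, then forms the pair of powers of two in closed form by splitting the count into its ceiling and floor halves.
import Mathlib
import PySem

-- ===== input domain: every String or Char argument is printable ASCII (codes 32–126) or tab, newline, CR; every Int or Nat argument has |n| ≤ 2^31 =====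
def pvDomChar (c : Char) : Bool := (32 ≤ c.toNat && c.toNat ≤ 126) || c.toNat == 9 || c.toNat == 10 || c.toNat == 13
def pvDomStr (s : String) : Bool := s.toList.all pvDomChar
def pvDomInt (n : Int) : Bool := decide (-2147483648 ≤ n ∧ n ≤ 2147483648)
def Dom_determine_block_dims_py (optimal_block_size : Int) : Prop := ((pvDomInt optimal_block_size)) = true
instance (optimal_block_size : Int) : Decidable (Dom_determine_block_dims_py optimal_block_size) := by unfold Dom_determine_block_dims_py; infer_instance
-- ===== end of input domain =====

-- B replaces A's alternating if/else doubling of an (x, y) pair by a single scalar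
-- doubling counter and a closed-form split of the exponent (objective: simpler).

-- ===== PORT A =====
-- A's while loop as structural recursion on fuel (64 is ample: the loop runs at most
-- 31 times for |optimal_block_size| ≤ 2^31; the fuel only makes the recursion total).
def pvALoop (fuel : Nat) (x y z obs : Int) : Int × Int × Int :=
  match fuel with
  | 0 => (x, y, z)
  | f + 1 =>
    if x * y * 2 ≤ obs then
      if x > y then pvALoop f x (y * 2) z obs
      else pvALoop f (x * 2) y z obs
    else (x, y, z)

def determine_block_dims_py (optimal_block_size : Int) : Int × Int × Int :=
  pvALoop 64 1 1 1 optimal_block_size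

-- ===== PORT B =====
-- B's counting loop, same fuel discipline.
def pvBCount (fuel : Nat) (size : Int) (n : Nat) (obs : Int) : Nat :=
  match fuel with
  | 0 => n
  | f + 1 =>
    if size * 2 ≤ obs then pvBCount f (size * 2) (n + 1) obs
    else n

def determine_block_dims_py_alt (optimal_block_size : Int) : Int × Int × Int :=
  let n := pvBCount 64 1 0 optimal_block_size
  ((2 : Int) ^ ((n + 1) / 2), (2 : Int) ^ (n / 2), 1)

-- ===== PRECONDITION & SPEC =====
def Spec_determine_block_dims_py (optimal_block_size : Int) (out : Int × Int × Int) : Prop := out = determine_block_dims_py_alt optimal_block_size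
instance (optimal_block_size : Int) (out : Int × Int × Int) : Decidable (Spec_determine_block_dims_py optimal_block_size out) := by unfold Spec_determine_block_dims_py; infer_instance

-- ===== CLAIM (what is proved, stated in full; the proofs are below) =====
def Claim_equal_determine_block_dims_py : Prop := ∀ (optimal_block_size : Int), Dom_determine_block_dims_py optimal_block_size → Spec_determine_block_dims_py optimal_block_size (determine_block_dims_py optimal_block_size)

-- ===== LEMMAS AND PROOFS =====

-- A's state after k doublings is (2^((k+1)/2), 2^(k/2), 1); with that invariant the two
-- loops advance in lockstep for the same fuel.
lemma pvALoop_eq_pvBCount (fuel : Nat) : ∀ (k : Nat) (obs : Int),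
    pvALoop fuel ((2 : Int) ^ ((k + 1) / 2)) ((2 : Int) ^ (k / 2)) 1 obs
      = ((2 : Int) ^ ((pvBCount fuel ((2 : Int) ^ k) k obs + 1) / 2),
         (2 : Int) ^ ((pvBCount fuel ((2 : Int) ^ k) k obs) / 2), 1) := by
  induction fuel with
  | zero => intro k obs; simp [pvALoop, pvBCount]
  | succ f ih =>
    intro k obs
    have hxy : (2 : Int) ^ ((k + 1) / 2) * (2 : Int) ^ (k / 2) = (2 : Int) ^ k := by
      rw [← pow_add]; congr 1; omega
    have hgt : ((2 : Int) ^ ((k + 1) / 2) > (2 : Int) ^ (k / 2)) ↔ k % 2 = 1 := by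
      show (2 : Int) ^ (k / 2) < (2 : Int) ^ ((k + 1) / 2) ↔ k % 2 = 1
      rw [pow_lt_pow_iff_right₀ (by norm_num : (1 : Int) < 2)]; omega
    simp only [pvALoop, pvBCount, hxy]
    by_cases hc : (2 : Int) ^ k * 2 ≤ obs
    · simp only [hc, if_pos]
      rw [show (2 : Int) ^ k * 2 = (2 : Int) ^ (k + 1) from (pow_succ 2 k).symm]
      by_cases hk : k % 2 = 1
      · rw [if_pos (hgt.mpr hk)]
        rw [show (2 : Int) ^ ((k + 1) / 2) = (2 : Int) ^ ((k + 1 + 1) / 2) from by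
              rw [show (k + 1 + 1) / 2 = (k + 1) / 2 from by omega],
            show (2 : Int) ^ (k / 2) * 2 = (2 : Int) ^ ((k + 1) / 2) from by
              rw [show (k + 1) / 2 = k / 2 + 1 from by omega, pow_succ]]
        exact ih (k + 1) obs
      · rw [if_neg (by rw [hgt]; omega)]
        rw [show (2 : Int) ^ ((k + 1) / 2) * 2 = (2 : Int) ^ ((k + 1 + 1) / 2) from by
              rw [show (k + 1 + 1) / 2 = (k + 1) / 2 + 1 from by omega, pow_succ],
            show (2 : Int) ^ (k / 2) = (2 : Int) ^ ((k + 1) / 2) from by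
              rw [show (k + 1) / 2 = k / 2 from by omega]]
        exact ih (k + 1) obs
    · simp [hc]

-- ===== VERDICT (by name: the statement is the Claim_ definition above) =====
theorem determine_block_dims_py_spec : Claim_equal_determine_block_dims_py := by
  intro obs _
  show determine_block_dims_py obs = determine_block_dims_py_alt obs
  have h := pvALoop_eq_pvBCount 64 0 obs
  simpa [determine_block_dims_py, determine_block_dims_py_alt] using h
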